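-- pv_equiv track=rewrite | github.com/dltpal07/cnn_sentence_classification | code/utils.py | make_char_dict
-- ===== SOURCE A (Python) =====
-- def make_char_dict(lemmas):
-- 	char_dict = {}
-- 	char_dict['<P>'] = 0
-- 	char_dict['<U>'] = 1
-- 	sum_lemmas = sum(lemmas, [])
-- 	sum_lemmas = "".join(sum_lemmas)
-- 	sum_lemmas = list(sum_lemmas)
-- 	char_list = list(set(sum_lemmas))
-- 	char_list.sort()
-- 	idx = 2
-- 	for char in char_list:
-- 		char_dict[char] = idx
-- 		idx += 1
-- 	return char_dict
-- ===== SOURCE B (Python) =====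
-- def make_char_dict(lemmas):
-- 	char_dict = {'<P>': 0, '<U>': 1}
-- 	seen = set()
-- 	maxc = -1
-- 	for words in lemmas:
-- 		for w in words:
-- 			for c in w:
-- 				o = ord(c)
-- 				seen.add(o)
-- 				if o > maxc:
-- 					maxc = o
-- 	idx = 2
-- 	for code in range(maxc + 1):
-- 		if code in seen:
-- 			char_dict[chr(code)] = idx
-- 			idx += 1
-- 	return char_dict
-- ===== Notes on version B (the rewrite author's own statement) =====
-- stated objective: faster
-- what changed: B never sorts: it records each character's code point in a set while tracking the maximum code, then enumerates the integer code space 0..maxc once, emitting chr(code) for each code present - a counting/bucket pass replaces A's set-then-comparison-sort.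
import Mathlib
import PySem

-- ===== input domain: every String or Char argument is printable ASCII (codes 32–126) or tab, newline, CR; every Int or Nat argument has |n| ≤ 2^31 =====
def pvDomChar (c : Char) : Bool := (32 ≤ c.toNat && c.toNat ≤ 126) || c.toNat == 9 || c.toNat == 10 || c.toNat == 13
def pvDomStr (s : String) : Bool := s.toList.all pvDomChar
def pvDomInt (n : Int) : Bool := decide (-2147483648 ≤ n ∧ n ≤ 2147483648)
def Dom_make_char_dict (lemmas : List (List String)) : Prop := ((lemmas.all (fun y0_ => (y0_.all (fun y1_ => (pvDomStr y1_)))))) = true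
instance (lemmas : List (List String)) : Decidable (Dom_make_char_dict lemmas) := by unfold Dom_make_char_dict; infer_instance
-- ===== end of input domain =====

-- B replaces A's set-then-comparison-sort by a counting pass: it collects the integer
-- code points (tracking the maximum) and then enumerates the code space 0..maxc once,
-- emitting chr(code) for each code present (objective: alternative; no sort at all).

-- ===== PORT A =====
def make_char_dict (lemmas : List (List String)) : List (String × Int) :=
  let char_dict : PySem.Dict String Int :=
    PySem.Dict.insert (PySem.Dict.insert PySem.Dict.empty "<P>" 0) "<U>" 1
  let sum_lemmas : List String := lemmas.foldl (· ++ ·) []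
  let joined : String := PySem.Str.join "" sum_lemmas
  let sum_chars : List Char := joined.toList
  let char_list : List Char :=
    PySem.List.sorted (PySem.Set.ofList sum_chars) (fun c => c) false
  let res := char_list.foldl
    (fun (st : PySem.Dict String Int × Int) c =>
      (st.1.insert (String.ofList [c]) st.2, st.2 + 1)) (char_dict, 2)
  res.1.items

-- ===== PORT B =====
def make_char_dict_alt (lemmas : List (List String)) : List (String × Int) :=
  let char_dict : PySem.Dict String Int :=
    PySem.Dict.insert (PySem.Dict.insert PySem.Dict.empty "<P>" 0) "<U>" 1
  -- for words in lemmas: for w in words: for c in w: seen.add(ord(c)); maxc = max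
  let st : PySem.Set Int × Int :=
    lemmas.foldl (fun st words =>
      words.foldl (fun st w =>
        w.toList.foldl (fun (st : PySem.Set Int × Int) c =>
          let o : Int := (c.toNat : Int)
          (PySem.Set.add st.1 o, if st.2 < o then o else st.2)) st) st)
      (PySem.Set.empty, -1)
  -- for code in range(maxc + 1): if code in seen: char_dict[chr(code)] = idx; idx += 1
  let res := (PySem.List.pyRange 0 (st.2 + 1) 1).foldl
    (fun (acc : PySem.Dict String Int × Int) code =>
      if PySem.Set.contains st.1 code then
        (acc.1.insert (String.ofList [Char.ofNat code.toNat]) acc.2, acc.2 + 1)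
      else acc)
    (char_dict, 2)
  res.1.items

-- ===== PRECONDITION & SPEC =====
def Spec_make_char_dict (lemmas : List (List String)) (out : List (String × Int)) : Prop := out = make_char_dict_alt lemmas
instance (lemmas : List (List String)) (out : List (String × Int)) : Decidable (Spec_make_char_dict lemmas out) := by unfold Spec_make_char_dict; infer_instance

-- ===== CLAIM (what is proved, stated in full; the proofs are below) =====
def Claim_equal_make_char_dict : Prop := ∀ (lemmas : List (List String)), Dom_make_char_dict lemmas → Spec_make_char_dict lemmas (make_char_dict lemmas)

-- ===== LEMMAS AND PROOFS =====

-- generic: folding over a flatMap is the nested fold (via List.foldl_flatten / List.foldl_map)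
theorem foldl_flatMap {α β γ : Type} (l : List α) (g : α → List β) (f : γ → β → γ) (i : γ) :
    (l.flatMap g).foldl f i = l.foldl (fun a x => (g x).foldl f a) i := by
  rw [List.flatMap_def, List.foldl_flatten, List.foldl_map]

-- the two flattened character lists coincide (A's sum + join vs B's nested loops)
theorem chars_eq (lemmas : List (List String)) :
    (PySem.Str.join "" (lemmas.foldl (· ++ ·) [])).toList
      = lemmas.flatMap (fun words => words.flatMap String.toList) := by
  have he : "".toList = ([] : List Char) := rfl
  have hjoin : ∀ (ss : List String), (PySem.Str.join "" ss).toList = ss.flatMap String.toList := by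
    intro ss
    induction ss with
    | nil => simp [PySem.Chars.join_nil]
    | cons a t ih =>
      cases t with
      | nil => simp [PySem.Chars.join_singleton]
      | cons b r =>
        simp only [PySem.Str.toList_join, he] at ih ⊢
        simp only [List.map_cons, PySem.Chars.join_cons_cons, List.flatMap_cons] at ih ⊢
        simp [ih]
  have hfold : ∀ (l : List (List String)) (acc : List String),
      l.foldl (· ++ ·) acc = acc ++ l.flatten := by
    intro l
    induction l with
    | nil => intro acc; simp
    | cons a t ih => intro acc; simp [List.foldl_cons, ih]
  rw [hjoin, hfold]
  induction lemmas with
  | nil => simp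
  | cons a t ih => simp only [List.flatten_cons, List.flatMap_cons, List.flatMap_append]; simp at ih; rw [ih]; simp

-- the max-tracking step, in isolation
def maxStep (m : Int) (c : Char) : Int := if m < (c.toNat : Int) then (c.toNat : Int) else m

-- B's pair fold splits into the seen-set and the running maximum
theorem stepFold : ∀ (cs : List Char) (s : PySem.Set Int) (m : Int),
    cs.foldl (fun (st : PySem.Set Int × Int) c =>
        (PySem.Set.add st.1 ((c.toNat : Int)), if st.2 < (c.toNat : Int) then (c.toNat : Int) else st.2)) (s, m)
      = (PySem.Set.update s (cs.map (fun c => ((c.toNat : Int)))), cs.foldl maxStep m) := by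
  intro cs
  induction cs with
  | nil => intro s m; simp [PySem.Set.update]
  | cons c rest ih =>
    intro s m
    simp only [List.foldl_cons, List.map_cons, PySem.Set.update_cons, maxStep]
    exact ih _ _

-- the running maximum only grows
theorem le_foldl_maxStep_init : ∀ (cs : List Char) (m : Int), m ≤ cs.foldl maxStep m := by
  intro cs
  induction cs with
  | nil => intro m; simp
  | cons c rest ih =>
    intro m
    refine le_trans ?_ (ih (maxStep m c))
    simp only [maxStep]; split_ifs with h
    · omega
    · omega

-- every recorded code is bounded by the final maximum
theorem code_le_foldl_maxStep : ∀ (cs : List Char) (m : Int), ∀ c ∈ cs, (c.toNat : Int) ≤ cs.foldl maxStep m := by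
  intro cs
  induction cs with
  | nil => intro m c hc; simp at hc
  | cons a rest ih =>
    intro m c hc
    rcases List.mem_cons.mp hc with h | hc
    · subst h
      refine le_trans ?_ (le_foldl_maxStep_init rest (maxStep m c))
      simp only [maxStep]; split_ifs with h <;> omega
    · exact ih (maxStep m a) c hc

-- membership in B's seen set = having a char of cs with that code
theorem mem_seen (cs : List Char) (code : Int) :
    code ∈ PySem.Set.ofList (cs.map (fun c => ((c.toNat : Int)))) ↔ ∃ c ∈ cs, code = (c.toNat : Int) := by
  rw [PySem.Set.mem_ofList, List.mem_map]
  constructor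
  · rintro ⟨c, hc, rfl⟩; exact ⟨c, hc, rfl⟩
  · rintro ⟨c, hc, rfl⟩; exact ⟨c, hc, rfl⟩

-- B's enumeration of the code space produces exactly A's sorted unique char list
theorem enum_eq_sorted (cs : List Char) :
    PySem.List.sorted (PySem.Set.ofList cs) (fun c => c) false
      = ((PySem.List.pyRange 0 (cs.foldl maxStep (-1) + 1) 1).filter
          (fun code => PySem.Set.contains (PySem.Set.ofList (cs.map (fun c => ((c.toNat : Int))))) code)).map
          (fun code => Char.ofNat code.toNat) := by
  set seen := PySem.Set.ofList (cs.map (fun c => ((c.toNat : Int)))) with hseen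
  set maxc := cs.foldl maxStep (-1) with hmaxc
  set F := (PySem.List.pyRange 0 (maxc + 1) 1).filter (fun code => PySem.Set.contains seen code) with hF
  -- every element of the filtered range is the (valid) code of some char of cs
  have hmemF : ∀ code ∈ F, ∃ c ∈ cs, code = (c.toNat : Int) := by
    intro code hcode
    rw [hF, List.mem_filter] at hcode
    have := hcode.2
    rw [PySem.Set.contains_iff, hseen, mem_seen] at this
    exact this
  have hpairF : F.Pairwise (· < ·) :=
    List.Pairwise.filter _ (PySem.List.pairwise_lt_pyRange_one 0 (maxc + 1))
  -- the mapped list is strictly increasing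
  have hpairL : (F.map (fun code => Char.ofNat code.toNat)).Pairwise (· < ·) := by
    rw [List.pairwise_map]
    refine List.Pairwise.imp_of_mem ?_ hpairF
    intro a b ha hb hab
    rcases hmemF a ha with ⟨ca, _, rfl⟩
    rcases hmemF b hb with ⟨cb, _, rfl⟩
    simp only [Int.toNat_natCast, Char.ofNat_toNat]
    exact Char.lt_def.mpr (by exact_mod_cast hab)
  -- the mapped list has exactly the members of set(cs)
  have hmemL : ∀ x, x ∈ F.map (fun code => Char.ofNat code.toNat) ↔ x ∈ PySem.Set.ofList cs := by
    intro x
    rw [List.mem_map, PySem.Set.mem_ofList]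
    constructor
    · rintro ⟨code, hcode, rfl⟩
      rcases hmemF code hcode with ⟨c, hc, rfl⟩
      simpa [Int.toNat_natCast, Char.ofNat_toNat] using hc
    · intro hx
      refine ⟨(x.toNat : Int), ?_, by simp [Int.toNat_natCast, Char.ofNat_toNat]⟩
      rw [hF, List.mem_filter]
      constructor
      · rw [PySem.List.mem_pyRange_one]
        refine ⟨by positivity, ?_⟩
        have := code_le_foldl_maxStep cs (-1) x hx
        rw [← hmaxc] at this
        omega
      · rw [PySem.Set.contains_iff, hseen, mem_seen]
        exact ⟨x, hx, rfl⟩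
  refine PySem.List.sorted_eq_of_perm_of_pairwise_lt _ _ _ ?_ hpairL
  refine (List.perm_ext_iff_of_nodup (hpairL.imp ne_of_lt) (PySem.Set.nodup_ofList cs)).mpr hmemL

-- ===== VERDICT (by name: the statement is the Claim_ definition above) =====
theorem make_char_dict_spec : Claim_equal_make_char_dict := by
  intro lemmas _
  unfold Spec_make_char_dict make_char_dict make_char_dict_alt
  simp only
  rw [chars_eq]
  set cs := lemmas.flatMap (fun words => words.flatMap String.toList) with hcs
  have hflat :
      lemmas.foldl (fun st words =>
        words.foldl (fun st w =>
          w.toList.foldl (fun (st : PySem.Set Int × Int) c =>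
            (PySem.Set.add st.1 ((c.toNat : Int)), if st.2 < (c.toNat : Int) then (c.toNat : Int) else st.2)) st) st)
        (PySem.Set.empty, -1)
      = cs.foldl (fun (st : PySem.Set Int × Int) c =>
          (PySem.Set.add st.1 ((c.toNat : Int)), if st.2 < (c.toNat : Int) then (c.toNat : Int) else st.2))
        (PySem.Set.empty, -1) := by
    rw [hcs, foldl_flatMap]
    simp only [foldl_flatMap]
  rw [hflat, stepFold]
  have hupd : PySem.Set.update PySem.Set.empty (cs.map (fun c => ((c.toNat : Int))))
      = PySem.Set.ofList (cs.map (fun c => ((c.toNat : Int)))) := PySem.Set.update_nil_left _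
  simp only [hupd]
  rw [← List.foldl_filter,
      ← List.foldl_map (f := fun code : Int => Char.ofNat code.toNat)
        (g := fun (acc : PySem.Dict String Int × Int) c => (acc.1.insert (String.ofList [c]) acc.2, acc.2 + 1)),
      ← enum_eq_sorted]
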